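-- pv_equiv track=rewrite | github.com/creatub/python-programmers | Greedy_2st_Joystick.py | solution
-- ===== SOURCE A (Python) =====
-- def solution(name):
--     answer = 0
--     ## 알파벳을 이동하는 동작 수
--     for c in name:
--         answer+= min(ord(c)-65, 91-ord(c))
--     ## A가 아닌 index 배열로 추출
--     add=0 # 이동 숫자 선언 < 미리 선언을 안해서 런타임 에러 발생했었음!!***
--     hopping_index = [x for x in range(len(name)) if name[x]!="A"]
--     if len(hopping_index)>0: # A가 있을 경우에만 수행***
--         way1 = hopping_index[-1] # 정방향으로 갔을 경우
--         way2 = len(name)-hopping_index[0] # 역방향으로 갔을 경우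
--         add = min(way1, way2)
--     if len(hopping_index)>1: # A가 아닌 문자가 2개 이상일 경우만 detour***
--         for i in range(len(hopping_index)-1): # detour하는 경우
--             way1 = hopping_index[i]*2 + len(name)-hopping_index[i+1] #정방향
--             way2 = hopping_index[i] + (len(name)-hopping_index[i+1])*2 #역방향
--             add = min(add, way1, way2)
--     answer += add
--     return answer
-- ===== SOURCE B (Python) =====
-- def solution(name):
--     answer = sum(min(ord(c) - 65, 91 - ord(c)) for c in name)
--     n = len(name)
--     if n == 0:
--         return answer
--     move = n - 1
--     for i in range(n):
--         nxt = i + 1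
--         while nxt < n and name[nxt] == 'A':
--             nxt += 1
--         move = min(move, 2 * i + (n - nxt), i + 2 * (n - nxt))
--     return answer + move
-- ===== Notes on version B (the rewrite author's own statement) =====
-- stated objective: alternative
-- what changed: B drops A's precomputed list of non-'A' indices and its adjacent-pairs detour loop; instead it does a single run-skipping scan: for each position i it advances an inner cursor past the run of 'A's to the next needed letter and folds min(n-1, 2*i+(n-nxt), i+2*(n-nxt)) on the fly, with an explicit n==0 guard.
import Mathlib
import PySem

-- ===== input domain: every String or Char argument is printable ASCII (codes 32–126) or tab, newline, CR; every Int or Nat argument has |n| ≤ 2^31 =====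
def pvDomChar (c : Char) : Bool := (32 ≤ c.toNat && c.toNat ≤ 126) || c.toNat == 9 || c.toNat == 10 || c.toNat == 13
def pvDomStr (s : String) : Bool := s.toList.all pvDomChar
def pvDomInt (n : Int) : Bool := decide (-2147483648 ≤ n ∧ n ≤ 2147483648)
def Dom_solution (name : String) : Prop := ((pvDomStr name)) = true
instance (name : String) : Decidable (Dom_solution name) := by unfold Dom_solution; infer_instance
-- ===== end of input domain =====

-- B replaces A's non-'A' index list and adjacent-pairs detour loop by a single run-skipping
-- scan (alternative decomposition, same result); equivalence proved for every string.

-- ===== PORT A =====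
-- all indexing below is in range under the guards, so List.getD/headD/getLastD are exact
def solution (name : String) : Int :=
  let cs := name.toList
  let answer : Int := cs.foldl (fun a c => a + min ((c.toNat : Int) - 65) (91 - (c.toNat : Int))) 0
  let n := cs.length
  let hopping := (List.range n).filter (fun x => cs.getD x 'A' != 'A')
  let add : Int :=
    if hopping.length > 0 then
      min ((hopping.getLastD 0 : Nat) : Int) ((n : Int) - ((hopping.headD 0 : Nat) : Int))
    else 0
  let add : Int :=
    if hopping.length > 1 then
      (List.range (hopping.length - 1)).foldl (fun a i =>
        min a (min (((hopping.getD i 0 : Nat) : Int) * 2 + (n : Int) - ((hopping.getD (i+1) 0 : Nat) : Int))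
                   (((hopping.getD i 0 : Nat) : Int) + ((n : Int) - ((hopping.getD (i+1) 0 : Nat) : Int)) * 2))) add
    else add
  answer + add

-- ===== PORT B =====
-- the inner `while nxt < n and name[nxt] == 'A'` loop of Source B
def skipA (cs : List Char) (j : Nat) : Nat :=
  if h : j < cs.length then
    if cs.getD j 'A' = 'A' then skipA cs (j+1) else j
  else j
termination_by cs.length - j

def solution_alt (name : String) : Int :=
  let cs := name.toList
  let answer : Int := cs.foldl (fun a c => a + min ((c.toNat : Int) - 65) (91 - (c.toNat : Int))) 0
  let n := cs.length
  if n = 0 then answer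
  else
    answer + (List.range n).foldl (fun mv i =>
      let nxt := skipA cs (i+1)
      min mv (min (2 * (i : Int) + ((n : Int) - (nxt : Int))) ((i : Int) + 2 * ((n : Int) - (nxt : Int))))) ((n : Int) - 1)

-- ===== PRECONDITION & SPEC =====
def Spec_solution (name : String) (out : Int) : Prop := out = solution_alt name
instance (name : String) (out : Int) : Decidable (Spec_solution name out) := by unfold Spec_solution; infer_instance

-- ===== CLAIM (what is proved, stated in full; the proofs are below) =====
def Claim_equal_solution : Prop := ∀ (name : String), Dom_solution name → Spec_solution name (solution name)

-- ===== LEMMAS AND PROOFS =====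

-- proof-side abbreviations for the two horizontal-move computations
def hopL (cs : List Char) : List Nat :=
  (List.range cs.length).filter (fun x => cs.getD x 'A' != 'A')

def addA (cs : List Char) : Int :=
  let hopping := hopL cs
  let add : Int :=
    if hopping.length > 0 then
      min ((hopping.getLastD 0 : Nat) : Int) ((cs.length : Int) - ((hopping.headD 0 : Nat) : Int))
    else 0
  if hopping.length > 1 then
    (List.range (hopping.length - 1)).foldl (fun a i =>
      min a (min (((hopping.getD i 0 : Nat) : Int) * 2 + (cs.length : Int) - ((hopping.getD (i+1) 0 : Nat) : Int))
                 (((hopping.getD i 0 : Nat) : Int) + (((cs.length : Int)) - ((hopping.getD (i+1) 0 : Nat) : Int)) * 2))) add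
  else add

def moveB (cs : List Char) : Int :=
  (List.range cs.length).foldl (fun mv i =>
    let nxt := skipA cs (i+1)
    min mv (min (2 * (i : Int) + ((cs.length : Int) - (nxt : Int))) ((i : Int) + 2 * ((cs.length : Int) - (nxt : Int))))) ((cs.length : Int) - 1)

lemma solution_eq (name : String) :
    solution name = (name.toList.foldl (fun a c => a + min ((c.toNat : Int) - 65) (91 - (c.toNat : Int))) 0) + addA name.toList := by
  simp [solution, addA, hopL]

lemma solution_alt_eq (name : String) (h : name.toList ≠ []) :
    solution_alt name = (name.toList.foldl (fun a c => a + min ((c.toNat : Int) - 65) (91 - (c.toNat : Int))) 0) + moveB name.toList := by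
  simp only [solution_alt, moveB]
  rw [if_neg (by simpa [List.length_eq_zero_iff] using h)]

-- generic min-fold lemmas
lemma foldmin_le_init {α : Type} (L : List α) (f : α → Int) (a : Int) :
    L.foldl (fun m x => min m (f x)) a ≤ a := by
  induction L generalizing a with
  | nil => simp
  | cons y t ih => exact le_trans (ih _) (by simp)

lemma foldmin_le_mem {α : Type} (L : List α) (f : α → Int) (a : Int) {x : α} (hx : x ∈ L) :
    L.foldl (fun m x => min m (f x)) a ≤ f x := by
  induction L generalizing a with
  | nil => cases hx
  | cons y t ih =>
    rcases List.mem_cons.mp hx with rfl | hx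
    · simp only [List.foldl_cons]
      exact le_trans (foldmin_le_init _ _ _) (min_le_right _ _)
    · exact ih _ hx

lemma le_foldmin {α : Type} (L : List α) (f : α → Int) (b : Int) :
    ∀ a : Int, b ≤ a → (∀ x ∈ L, b ≤ f x) → b ≤ L.foldl (fun m x => min m (f x)) a := by
  induction L with
  | nil => intro a hb _; simpa using hb
  | cons y t ih =>
    intro a hb h
    exact ih _ (le_min hb (h y List.mem_cons_self))
      (fun x hx => h x (List.mem_cons_of_mem _ hx))

lemma foldmin_cases {α : Type} (L : List α) (f : α → Int) (a : Int) :
    L.foldl (fun m x => min m (f x)) a = a ∨ ∃ x ∈ L, L.foldl (fun m x => min m (f x)) a = f x := by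
  induction L generalizing a with
  | nil => simp
  | cons y t ih =>
    rcases ih (min a (f y)) with h | ⟨x, hx, h⟩
    · rcases min_cases a (f y) with ⟨he, _⟩ | ⟨he, _⟩
      · left; simpa [he] using h
      · right; exact ⟨y, List.mem_cons_self, by simpa [he] using h⟩
    · right; exact ⟨x, List.mem_cons_of_mem _ hx, h⟩

-- hopL facts
lemma mem_hopL {cs : List Char} {x : Nat} :
    x ∈ hopL cs ↔ x < cs.length ∧ cs.getD x 'A' ≠ 'A' := by
  simp [hopL, List.mem_filter]

lemma hopL_sorted (cs : List Char) : (hopL cs).Pairwise (· < ·) :=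
  List.Pairwise.sublist List.filter_sublist List.pairwise_lt_range

lemma headD_le_of_sorted {L : List Nat} (hs : L.Pairwise (· < ·)) {x : Nat} (hx : x ∈ L) :
    L.headD 0 ≤ x := by
  cases L with
  | nil => simp at hx
  | cons a t =>
    rcases List.mem_cons.mp hx with rfl | hx
    · simp
    · exact le_of_lt ((List.pairwise_cons.mp hs).1 x hx)

lemma getLastD_mem' {L : List Nat} (h : L ≠ []) : L.getLastD 0 ∈ L := by
  induction L with
  | nil => exact absurd rfl h
  | cons a t ih =>
    cases t with
    | nil => simp
    | cons b t' => simpa using Or.inr (ih (by simp))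

lemma le_getLastD_of_sorted {L : List Nat} (hs : L.Pairwise (· < ·)) {x : Nat} (hx : x ∈ L) :
    x ≤ L.getLastD 0 := by
  induction L with
  | nil => simp at hx
  | cons a t ih =>
    cases t with
    | nil => simp at hx; simp [hx]
    | cons b t' =>
      rcases List.mem_cons.mp hx with rfl | hx
      · have := (List.pairwise_cons.mp hs).1 (List.getLastD (b :: t') 0)
          (getLastD_mem' (by simp))
        simpa using le_of_lt this
      · simpa using ih (List.pairwise_cons.mp hs).2 hx

-- skipA facts
lemma skipA_ge (cs : List Char) (j : Nat) : j ≤ skipA cs j := by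
  fun_induction skipA cs j with
  | case1 j h hA ih => omega
  | case2 j h hA => omega
  | case3 j h => omega

lemma skipA_le_len (cs : List Char) (j : Nat) (hj : j ≤ cs.length) : skipA cs j ≤ cs.length := by
  fun_induction skipA cs j with
  | case1 j h hA ih => exact ih (by omega)
  | case2 j h hA => omega
  | case3 j h => omega

lemma skipA_nonA (cs : List Char) (j : Nat) (h : skipA cs j < cs.length) :
    cs.getD (skipA cs j) 'A' ≠ 'A' := by
  fun_induction skipA cs j with
  | case1 j hlt hA ih => exact ih h
  | case2 j hlt hA => exact hA
  | case3 j hlt => omega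

lemma skipA_all_A (cs : List Char) (j : Nat) :
    ∀ k, j ≤ k → k < skipA cs j → cs.getD k 'A' = 'A' := by
  fun_induction skipA cs j with
  | case1 j hlt hA ih =>
    intro k hk1 hk2
    rcases Nat.eq_or_lt_of_le hk1 with rfl | h
    · exact hA
    · exact ih k h hk2
  | case2 j hlt hA => intro k hk1 hk2; omega
  | case3 j hlt => intro k hk1 hk2; omega

lemma skipA_le_of (cs : List Char) (j : Nat) {k : Nat} (hk : j ≤ k) (_hkn : k < cs.length)
    (hP : cs.getD k 'A' ≠ 'A') : skipA cs j ≤ k := by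
  by_contra hc
  exact hP (skipA_all_A cs j k hk (by omega))

lemma skipA_eq_len (cs : List Char) (j : Nat) (hj : j ≤ cs.length)
    (h : ∀ k, j ≤ k → k < cs.length → cs.getD k 'A' = 'A') : skipA cs j = cs.length := by
  have h1 := skipA_le_len cs j hj
  rcases Nat.eq_or_lt_of_le h1 with he | hlt
  · exact he
  · exact absurd (h _ (skipA_ge cs j) hlt) (skipA_nonA cs j hlt)

lemma skipA_eq (cs : List Char) (j t : Nat) (hjt : j ≤ t) (htn : t < cs.length)
    (ht : cs.getD t 'A' ≠ 'A') (hall : ∀ k, j ≤ k → k < t → cs.getD k 'A' = 'A') :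
    skipA cs j = t := by
  have h1 : skipA cs j ≤ t := skipA_le_of cs j hjt htn ht
  rcases Nat.eq_or_lt_of_le h1 with he | hlt
  · exact he
  · exact absurd (hall _ (skipA_ge cs j) hlt) (skipA_nonA cs j (by omega))

-- prevA: the largest non-'A' index ≤ i, if any (proof helper)
def prevA (cs : List Char) : Nat → Option Nat
  | 0 => if cs.getD 0 'A' = 'A' then none else some 0
  | (i+1) => if cs.getD (i+1) 'A' = 'A' then prevA cs i else some (i+1)

lemma prevA_none (cs : List Char) (i : Nat) (h : prevA cs i = none) :
    ∀ k ≤ i, cs.getD k 'A' = 'A' := by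
  induction i with
  | zero =>
    intro k hk
    have hk0 : k = 0 := by omega
    subst hk0
    by_contra hc
    rw [prevA, if_neg hc] at h
    cases h
  | succ i ih =>
    intro k hk
    by_cases hA : cs.getD (i+1) 'A' = 'A'
    · rw [prevA, if_pos hA] at h
      rcases Nat.lt_or_ge k (i+1) with h' | h'
      · exact ih h k (by omega)
      · have hki : k = i + 1 := by omega
        rwa [hki]
    · rw [prevA, if_neg hA] at h
      cases h

lemma prevA_some (cs : List Char) (i p : Nat) (h : prevA cs i = some p) :
    p ≤ i ∧ cs.getD p 'A' ≠ 'A' ∧ ∀ k, p < k → k ≤ i → cs.getD k 'A' = 'A' := by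
  induction i with
  | zero =>
    by_cases hA : cs.getD 0 'A' = 'A'
    · rw [prevA, if_pos hA] at h; cases h
    · rw [prevA, if_neg hA] at h
      have hp : p = 0 := by cases h; rfl
      subst hp
      exact ⟨le_refl _, hA, by intro k h1 h2; omega⟩
  | succ i ih =>
    by_cases hA : cs.getD (i+1) 'A' = 'A'
    · rw [prevA, if_pos hA] at h
      have h' := ih h
      refine ⟨by omega, h'.2.1, ?_⟩
      intro k hk1 hk2
      rcases Nat.lt_or_ge k (i+1) with h2 | h2
      · exact h'.2.2 k hk1 (by omega)
      · have hki : k = i + 1 := by omega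
        rwa [hki]
    · rw [prevA, if_neg hA] at h
      have hp : p = i + 1 := by cases h; rfl
      subst hp
      exact ⟨le_refl _, hA, by intro k h1 h2; omega⟩

-- adjacency in a strictly sorted list
lemma sorted_adjacent {L : List Nat} (hs : L.Pairwise (· < ·)) {p m : Nat}
    (hp : p ∈ L) (hm : m ∈ L) (hpm : p < m)
    (hno : ∀ q ∈ L, ¬(p < q ∧ q < m)) :
    ∃ i, i + 1 < L.length ∧ L.getD i 0 = p ∧ L.getD (i+1) 0 = m := by
  induction L with
  | nil => simp at hp
  | cons a t ih =>
    have hs' := List.pairwise_cons.mp hs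
    rcases List.mem_cons.mp hp with rfl | hpt
    · -- p = a; m ∈ t, and m must be the head of t
      have hmt : m ∈ t := by
        rcases List.mem_cons.mp hm with rfl | h
        · omega
        · exact h
      cases t with
      | nil => simp at hmt
      | cons b t' =>
        have hbm : b ≤ m := by
          rcases List.mem_cons.mp hmt with rfl | h
          · omega
          · exact le_of_lt ((List.pairwise_cons.mp hs'.2).1 m h)
        have hab : p < b := hs'.1 b List.mem_cons_self
        have : b = m := by
          by_contra hc
          exact hno b (by simp) ⟨hab, by omega⟩
        exact ⟨0, by simp, rfl, by simp [this]⟩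
    · -- p ∈ t, hence m ∈ t too
      have hmt : m ∈ t := by
        rcases List.mem_cons.mp hm with rfl | h
        · exact absurd (hs'.1 p hpt) (by omega)
        · exact h
      obtain ⟨i, hi, h1, h2⟩ := ih hs'.2 hpt hmt
        (fun q hq => hno q (List.mem_cons_of_mem _ hq))
      exact ⟨i + 1, by simpa using hi, h1, h2⟩

lemma getD_mem {L : List Nat} {i : Nat} (h : i < L.length) : L.getD i 0 ∈ L := by
  rw [List.getD_eq_getElem L 0 h]
  exact List.getElem_mem h

lemma sorted_getD_lt {L : List Nat} (hs : L.Pairwise (· < ·)) {i j : Nat}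
    (hij : i < j) (hj : j < L.length) : L.getD i 0 < L.getD j 0 := by
  rw [List.getD_eq_getElem L 0 (by omega), List.getD_eq_getElem L 0 hj]
  exact List.pairwise_iff_getElem.mp hs i j (by omega) hj hij

-- no element of a sorted list lies strictly between two adjacent entries
lemma sorted_no_between {L : List Nat} (hs : L.Pairwise (· < ·)) {i : Nat}
    (hi : i + 1 < L.length) {q : Nat} (hq : q ∈ L) :
    ¬(L.getD i 0 < q ∧ q < L.getD (i+1) 0) := by
  rintro ⟨h1, h2⟩
  obtain ⟨j, hj, rfl⟩ := List.mem_iff_getElem.mp hq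
  rcases Nat.lt_or_ge j (i+1) with h | h
  · have : L.getD j 0 ≤ L.getD i 0 := by
      rcases Nat.eq_or_lt_of_le (by omega : j ≤ i) with rfl | h'
      · exact le_refl _
      · exact le_of_lt (sorted_getD_lt hs h' (by omega))
    rw [List.getD_eq_getElem L 0 hj] at this; omega
  · have : L.getD (i+1) 0 ≤ L.getD j 0 := by
      rcases Nat.eq_or_lt_of_le h with rfl | h'
      · exact le_refl _
      · exact le_of_lt (sorted_getD_lt hs h' hj)
    rw [List.getD_eq_getElem L 0 hj] at this; omega

-- addA unfolded for nonempty hop list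
lemma addA_eq (cs : List Char) (h : hopL cs ≠ []) :
    addA cs = (List.range ((hopL cs).length - 1)).foldl (fun a i =>
      min a (min ((((hopL cs).getD i 0 : Nat) : Int) * 2 + (cs.length : Int) - (((hopL cs).getD (i+1) 0 : Nat) : Int))
                 ((((hopL cs).getD i 0 : Nat) : Int) + (((cs.length : Int)) - (((hopL cs).getD (i+1) 0 : Nat) : Int)) * 2)))
      (min (((hopL cs).getLastD 0 : Nat) : Int) ((cs.length : Int) - (((hopL cs).headD 0 : Nat) : Int))) := by
  have h0 : (hopL cs).length > 0 := List.length_pos_iff.mpr h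
  by_cases h1 : (hopL cs).length > 1
  · simp only [addA, if_pos h0, if_pos h1]
  · have hl1 : (hopL cs).length - 1 = 0 := by omega
    simp only [addA, if_pos h0, if_neg h1, hl1, List.range_zero, List.foldl_nil]

lemma addA_nil (cs : List Char) (h : hopL cs = []) : addA cs = 0 := by
  simp [addA, h]

lemma headD_mem' {L : List Nat} (h : L ≠ []) : L.headD 0 ∈ L := by
  cases L with
  | nil => exact absurd rfl h
  | cons a t => simp

lemma moveB_def (cs : List Char) : moveB cs =
    (List.range cs.length).foldl (fun (mv : Int) (i : Nat) =>
      min mv (min (2 * (i : Int) + ((cs.length : Int) - ((skipA cs (i+1) : Nat) : Int)))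
                  ((i : Int) + 2 * ((cs.length : Int) - ((skipA cs (i+1) : Nat) : Int))))) ((cs.length : Int) - 1) := rfl

lemma moveB_le (cs : List Char) (i : Nat) (hi : i < cs.length) :
    moveB cs ≤ min (2 * (i : Int) + ((cs.length : Int) - ((skipA cs (i+1) : Nat) : Int)))
                   ((i : Int) + 2 * ((cs.length : Int) - ((skipA cs (i+1) : Nat) : Int))) := by
  rw [moveB_def]
  exact foldmin_le_mem _ _ _ (List.mem_range.mpr hi)

lemma moveB_le_init (cs : List Char) : moveB cs ≤ (cs.length : Int) - 1 := by
  rw [moveB_def]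
  exact foldmin_le_init _ _ _

lemma addA_le_base (cs : List Char) (h : hopL cs ≠ []) :
    addA cs ≤ min (((hopL cs).getLastD 0 : Nat) : Int) ((cs.length : Int) - (((hopL cs).headD 0 : Nat) : Int)) := by
  rw [addA_eq cs h]
  exact foldmin_le_init _ _ _

lemma addA_le_detour (cs : List Char) (h : hopL cs ≠ []) (j : Nat) (hj : j + 1 < (hopL cs).length) :
    addA cs ≤ min ((((hopL cs).getD j 0 : Nat) : Int) * 2 + (cs.length : Int) - (((hopL cs).getD (j+1) 0 : Nat) : Int))
                  ((((hopL cs).getD j 0 : Nat) : Int) + (((cs.length : Int)) - (((hopL cs).getD (j+1) 0 : Nat) : Int)) * 2) := by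
  rw [addA_eq cs h]
  exact foldmin_le_mem _ _ _ (List.mem_range.mpr (by omega))

-- M2: addA ≤ each candidate of moveB's fold
lemma addA_le_f (cs : List Char) (_hne : cs ≠ []) (i : Nat) (hi : i < cs.length) :
    addA cs ≤ min (2 * (i : Int) + ((cs.length : Int) - ((skipA cs (i+1) : Nat) : Int)))
                  ((i : Int) + 2 * ((cs.length : Int) - ((skipA cs (i+1) : Nat) : Int))) := by
  have hm1 : i + 1 ≤ skipA cs (i+1) := skipA_ge cs (i+1)
  have hm2 : skipA cs (i+1) ≤ cs.length := skipA_le_len cs (i+1) (by omega)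
  by_cases hh : hopL cs = []
  · rw [addA_nil cs hh]
    apply le_min <;> omega
  · rcases Nat.eq_or_lt_of_le hm2 with hmn | hmn
    · -- no needed letter after i: the last hop is ≤ i
      have hlast := mem_hopL.mp (getLastD_mem' hh)
      have hli : (hopL cs).getLastD 0 ≤ i := by
        by_contra hc
        have := skipA_le_of cs (i+1) (k := (hopL cs).getLastD 0) (by omega) hlast.1 hlast.2
        omega
      have ha : addA cs ≤ (((hopL cs).getLastD 0 : Nat) : Int) :=
        le_trans (addA_le_base cs hh) (min_le_left _ _)
      apply le_min <;> omega
    · have hmA : cs.getD (skipA cs (i+1)) 'A' ≠ 'A' := skipA_nonA cs (i+1) hmn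
      have hm_mem : skipA cs (i+1) ∈ hopL cs := mem_hopL.mpr ⟨hmn, hmA⟩
      cases hp : prevA cs i with
      | none =>
        have hall := prevA_none cs i hp
        have hhead := mem_hopL.mp (headD_mem' hh)
        have hhead_gt : i < (hopL cs).headD 0 := by
          by_contra hc
          exact hhead.2 (hall _ (by omega))
        have h1 : (hopL cs).headD 0 ≤ skipA cs (i+1) := headD_le_of_sorted (hopL_sorted cs) hm_mem
        have h2 : skipA cs (i+1) ≤ (hopL cs).headD 0 :=
          skipA_le_of cs (i+1) (by omega) hhead.1 hhead.2
        have ha : addA cs ≤ (cs.length : Int) - (((hopL cs).headD 0 : Nat) : Int) :=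
          le_trans (addA_le_base cs hh) (min_le_right _ _)
        apply le_min <;> omega
      | some p =>
        obtain ⟨hpi, hpA, hpall⟩ := prevA_some cs i p hp
        have hp_mem : p ∈ hopL cs := mem_hopL.mpr ⟨by omega, hpA⟩
        have hno : ∀ q ∈ hopL cs, ¬(p < q ∧ q < skipA cs (i+1)) := by
          rintro q hq ⟨h1, h2⟩
          have hq' := mem_hopL.mp hq
          rcases Nat.lt_or_ge i q with hqi | hqi
          · have := skipA_le_of cs (i+1) (by omega) hq'.1 hq'.2
            omega
          · exact hq'.2 (hpall q h1 hqi)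
        obtain ⟨j, hj, hjp, hjm⟩ :=
          sorted_adjacent (hopL_sorted cs) hp_mem hm_mem (by omega) hno
        have hd := addA_le_detour cs hh j hj
        rw [hjp, hjm] at hd
        have hd1 : addA cs ≤ (p : Int) * 2 + (cs.length : Int) - ((skipA cs (i+1) : Nat) : Int) :=
          le_trans hd (min_le_left _ _)
        have hd2 : addA cs ≤ (p : Int) + ((cs.length : Int) - ((skipA cs (i+1) : Nat) : Int)) * 2 :=
          le_trans hd (min_le_right _ _)
        apply le_min <;> omega

-- M1 helpers: moveB is below each candidate of A
lemma moveB_le_last (cs : List Char) (hh : hopL cs ≠ []) :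
    moveB cs ≤ (((hopL cs).getLastD 0 : Nat) : Int) := by
  have hlast := mem_hopL.mp (getLastD_mem' hh)
  have hskip : skipA cs ((hopL cs).getLastD 0 + 1) = cs.length := by
    apply skipA_eq_len cs _ (by omega)
    intro k hk1 hk2
    by_contra hc
    have : k ∈ hopL cs := mem_hopL.mpr ⟨hk2, hc⟩
    have := le_getLastD_of_sorted (hopL_sorted cs) this
    omega
  have := le_trans (moveB_le cs _ hlast.1) (min_le_right _ _)
  rw [hskip] at this
  omega

lemma moveB_le_head (cs : List Char) (hne : cs ≠ []) (hh : hopL cs ≠ []) :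
    moveB cs ≤ (cs.length : Int) - (((hopL cs).headD 0 : Nat) : Int) := by
  have hn : 0 < cs.length := List.length_pos_iff.mpr hne
  have hhead := mem_hopL.mp (headD_mem' hh)
  by_cases h0 : (hopL cs).headD 0 = 0
  · have := moveB_le_init cs
    rw [h0]
    omega
  · have hskip : skipA cs 1 = (hopL cs).headD 0 := by
      apply skipA_eq cs 1 _ (by omega) hhead.1 hhead.2
      intro k hk1 hk2
      by_contra hc
      have : k ∈ hopL cs := mem_hopL.mpr ⟨by omega, hc⟩
      have := headD_le_of_sorted (hopL_sorted cs) this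
      omega
    have := le_trans (moveB_le cs 0 hn) (min_le_left _ _)
    rw [show (0:Nat) + 1 = 1 from rfl, hskip] at this
    omega

lemma moveB_le_detour (cs : List Char) (j : Nat) (hj : j + 1 < (hopL cs).length) :
    moveB cs ≤ min ((((hopL cs).getD j 0 : Nat) : Int) * 2 + (cs.length : Int) - (((hopL cs).getD (j+1) 0 : Nat) : Int))
                   ((((hopL cs).getD j 0 : Nat) : Int) + (((cs.length : Int)) - (((hopL cs).getD (j+1) 0 : Nat) : Int)) * 2) := by
  have hp := mem_hopL.mp (getD_mem (L := hopL cs) (i := j) (by omega))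
  have hm := mem_hopL.mp (getD_mem (L := hopL cs) (i := j+1) hj)
  have hpm : (hopL cs).getD j 0 < (hopL cs).getD (j+1) 0 :=
    sorted_getD_lt (hopL_sorted cs) (by omega) hj
  have hskip : skipA cs ((hopL cs).getD j 0 + 1) = (hopL cs).getD (j+1) 0 := by
    apply skipA_eq cs _ _ (by omega) hm.1 hm.2
    intro k hk1 hk2
    by_contra hc
    exact sorted_no_between (hopL_sorted cs) hj (mem_hopL.mpr ⟨by omega, hc⟩) ⟨by omega, hk2⟩
  have h1 := le_trans (moveB_le cs _ hp.1) (min_le_left _ _)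
  have h2 := le_trans (moveB_le cs _ hp.1) (min_le_right _ _)
  rw [hskip] at h1 h2
  apply le_min <;> omega

-- the two horizontal computations agree on nonempty strings
lemma add_eq_move (cs : List Char) (hne : cs ≠ []) : addA cs = moveB cs := by
  have hn : 0 < cs.length := List.length_pos_iff.mpr hne
  apply le_antisymm
  · -- addA ≤ moveB
    rw [moveB_def]
    apply le_foldmin
    · by_cases hh : hopL cs = []
      · rw [addA_nil cs hh]; omega
      · have hlast := mem_hopL.mp (getLastD_mem' hh)
        have := le_trans (addA_le_base cs hh) (min_le_left _ _)
        omega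
    · intro i hi
      exact addA_le_f cs hne i (List.mem_range.mp hi)
  · -- moveB ≤ addA
    by_cases hh : hopL cs = []
    · rw [addA_nil cs hh]
      have hskip : skipA cs 1 = cs.length := by
        apply skipA_eq_len cs 1 (by omega)
        intro k hk1 hk2
        by_contra hc
        exact (List.ne_nil_of_mem (mem_hopL.mpr ⟨hk2, hc⟩)) hh
      have := le_trans (moveB_le cs 0 hn) (min_le_left _ _)
      rw [show (0:Nat) + 1 = 1 from rfl, hskip] at this
      omega
    · rw [addA_eq cs hh]
      rcases foldmin_cases (List.range ((hopL cs).length - 1)) _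
          (min (((hopL cs).getLastD 0 : Nat) : Int) ((cs.length : Int) - (((hopL cs).headD 0 : Nat) : Int))) with hc | ⟨j, hjr, hc⟩
      · rw [hc]
        exact le_min (moveB_le_last cs hh) (moveB_le_head cs hne hh)
      · rw [hc]
        exact moveB_le_detour cs j (by have := List.mem_range.mp hjr; omega)

-- ===== VERDICT (by name: the statement is the Claim_ definition above) =====
theorem solution_spec : Claim_equal_solution := by
  intro name _
  unfold Spec_solution
  by_cases h : name.toList = []
  · rw [solution_eq]
    simp [solution_alt, addA, hopL, h]
  · rw [solution_eq, solution_alt_eq name h, add_eq_move _ h]
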